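-- pv_equiv track=rewrite | github.com/HadiqaGohar/Neurobotics | book-backend/src/services/translation_service.py | _convert_to_eastern_arabic_numerals
-- ===== SOURCE A (Python) =====
-- def _convert_to_eastern_arabic_numerals(text: str) -> str:
--     """Convert Western numerals to Eastern Arabic numerals."""
--     western_to_eastern = {
--         '0': '۰', '1': '۱', '2': '۲', '3': '۳', '4': '۴',
--         '5': '۵', '6': '۶', '7': '۷', '8': '۸', '9': '۹'
--     }
--
--     for western, eastern in western_to_eastern.items():
--         text = text.replace(western, eastern)
--
--     return text
-- ===== SOURCE B (Python) =====
-- def _convert_to_eastern_arabic_numerals(text: str) -> str: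
--     """Convert Western numerals to Eastern Arabic numerals."""
--     western_to_eastern = {
--         '0': '۰', '1': '۱', '2': '۲', '3': '۳', '4': '۴',
--         '5': '۵', '6': '۶', '7': '۷', '8': '۸', '9': '۹'
--     }
--     return ''.join(western_to_eastern.get(ch, ch) for ch in text)
-- ===== Notes on version B (the rewrite author's own statement) =====
-- stated objective: alternative
-- what changed: B makes a single pass over the characters, looking each one up in the digit map and joining the results, instead of A's ten full-string replace passes (one per table entry).
import Mathlib
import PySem

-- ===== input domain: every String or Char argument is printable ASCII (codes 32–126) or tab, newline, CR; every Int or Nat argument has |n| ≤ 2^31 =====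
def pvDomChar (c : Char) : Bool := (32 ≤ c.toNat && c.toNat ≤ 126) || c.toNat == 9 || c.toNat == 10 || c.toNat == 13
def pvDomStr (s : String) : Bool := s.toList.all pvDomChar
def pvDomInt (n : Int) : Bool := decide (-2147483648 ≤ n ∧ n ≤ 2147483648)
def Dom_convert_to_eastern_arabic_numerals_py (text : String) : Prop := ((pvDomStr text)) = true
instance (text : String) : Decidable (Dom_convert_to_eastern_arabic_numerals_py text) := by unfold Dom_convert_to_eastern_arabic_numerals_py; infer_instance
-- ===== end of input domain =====

-- B replaces A's ten full-string replace passes by one single pass over the characters with a per-character map lookup.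


-- ===== PORT A =====
-- the dict western_to_eastern as an association list in insertion order
def pvWesternToEastern : List (String × String) :=
  [("0", "۰"), ("1", "۱"), ("2", "۲"), ("3", "۳"), ("4", "۴"),
   ("5", "۵"), ("6", "۶"), ("7", "۷"), ("8", "۸"), ("9", "۹")]

-- for western, eastern in western_to_eastern.items(): text = text.replace(western, eastern)
def convert_to_eastern_arabic_numerals_py (text : String) : String :=
  pvWesternToEastern.foldl (fun t p => PySem.Str.replace t p.1 p.2) text

-- ===== PORT B =====
-- the same mapping as a dict keyed per character (Python iterates a str as its 1-char strings)
def pvW2EChar : PySem.Dict Char Char :=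
  PySem.Dict.mk
  [('0', '۰'), ('1', '۱'), ('2', '۲'), ('3', '۳'), ('4', '۴'),
   ('5', '۵'), ('6', '۶'), ('7', '۷'), ('8', '۸'), ('9', '۹')]

-- ''.join(western_to_eastern.get(ch, ch) for ch in text)
def convert_to_eastern_arabic_numerals_py_alt (text : String) : String :=
  String.ofList (text.toList.map (fun ch => PySem.Dict.getD pvW2EChar ch ch))

-- ===== PRECONDITION & SPEC =====
def Spec_convert_to_eastern_arabic_numerals_py (text : String) (out : String) : Prop := out = convert_to_eastern_arabic_numerals_py_alt text
instance (text : String) (out : String) : Decidable (Spec_convert_to_eastern_arabic_numerals_py text out) := by unfold Spec_convert_to_eastern_arabic_numerals_py; infer_instance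

-- ===== CLAIM (what is proved, stated in full; the proofs are below) =====
def Claim_equal_convert_to_eastern_arabic_numerals_py : Prop := ∀ (text : String), Dom_convert_to_eastern_arabic_numerals_py text → Spec_convert_to_eastern_arabic_numerals_py text (convert_to_eastern_arabic_numerals_py text)

-- ===== LEMMAS AND PROOFS =====

-- what one single-char replace does to one character
def pvStep (c d x : Char) : Char := if x = c then d else x

-- replace.go with a single-char pattern is a pointwise map, given enough fuel
theorem pv_replace_go_single (c d : Char) (s acc : List Char) (fuel : Nat) (h : s.length ≤ fuel) :
    PySem.Chars.replace.go [c] [d] fuel s acc = acc.reverse ++ s.map (pvStep c d) := by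
  induction s generalizing fuel acc with
  | nil => cases fuel <;> simp [PySem.Chars.replace.go]
  | cons x t ih =>
    cases fuel with
    | zero => simp at h
    | succ n =>
      simp only [PySem.Chars.replace.go]
      simp only [List.length_cons] at h
      by_cases hx : x = c
      · subst hx
        rw [if_pos (by simp [List.isPrefixOf])]
        simp only [List.length_cons, List.length_nil, Nat.zero_add, List.drop_one, List.tail_cons]
        rw [ih _ _ (by omega)]
        simp [pvStep]
      · rw [if_neg (by simp [List.isPrefixOf]; intro hc; exact hx hc.symm)]
        rw [ih _ _ (by omega)]
        simp [pvStep, hx]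

-- replace with a single-char pattern and single-char replacement is a map
theorem pv_replace_single (c d : Char) (s : List Char) :
    PySem.Chars.replace s [c] [d] = s.map (pvStep c d) := by
  rw [PySem.Chars.replace]
  simp only [List.isEmpty_cons, if_neg Bool.false_ne_true]
  exact pv_replace_go_single c d s [] s.length (le_refl _)

-- the ten per-character steps, chained, are exactly B's dict lookup
theorem pv_char (x : Char) :
    pvStep '9' '۹' (pvStep '8' '۸' (pvStep '7' '۷' (pvStep '6' '۶' (pvStep '5' '۵'
      (pvStep '4' '۴' (pvStep '3' '۳' (pvStep '2' '۲' (pvStep '1' '۱' (pvStep '0' '۰' x)))))))))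
      = PySem.Dict.getD pvW2EChar x x := by
  have e : ∀ c d : Char, ¬ x = c → pvStep c d x = x := fun c d h => if_neg h
  by_cases h0 : x = '0'; · subst h0; decide
  by_cases h1 : x = '1'; · subst h1; decide
  by_cases h2 : x = '2'; · subst h2; decide
  by_cases h3 : x = '3'; · subst h3; decide
  by_cases h4 : x = '4'; · subst h4; decide
  by_cases h5 : x = '5'; · subst h5; decide
  by_cases h6 : x = '6'; · subst h6; decide
  by_cases h7 : x = '7'; · subst h7; decide
  by_cases h8 : x = '8'; · subst h8; decide
  by_cases h9 : x = '9'; · subst h9; decide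
  rw [e _ _ h0, e _ _ h1, e _ _ h2, e _ _ h3, e _ _ h4,
      e _ _ h5, e _ _ h6, e _ _ h7, e _ _ h8, e _ _ h9]
  simp [pvW2EChar, PySem.Dict.getD, PySem.Dict.get?, beq_iff_eq,
        Ne.symm h0, Ne.symm h1, Ne.symm h2, Ne.symm h3, Ne.symm h4,
        Ne.symm h5, Ne.symm h6, Ne.symm h7, Ne.symm h8, Ne.symm h9]

-- ===== VERDICT (by name: the statement is the Claim_ definition above) =====
theorem convert_to_eastern_arabic_numerals_py_spec : Claim_equal_convert_to_eastern_arabic_numerals_py := by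
  intro text _
  show convert_to_eastern_arabic_numerals_py text = convert_to_eastern_arabic_numerals_py_alt text
  unfold convert_to_eastern_arabic_numerals_py convert_to_eastern_arabic_numerals_py_alt pvWesternToEastern
  simp only [List.foldl]
  apply String.ext
  have hb : ∀ (t : String) (c d : Char) (o n : String), o.toList = [c] → n.toList = [d] →
      (PySem.Str.replace t o n).toList = t.toList.map (pvStep c d) := by
    intro t c d o n ho hn
    rw [PySem.Str.toList_replace, ho, hn]
    exact pv_replace_single c d t.toList
  rw [hb _ '9' '۹' _ _ rfl rfl, hb _ '8' '۸' _ _ rfl rfl, hb _ '7' '۷' _ _ rfl rfl,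
      hb _ '6' '۶' _ _ rfl rfl, hb _ '5' '۵' _ _ rfl rfl, hb _ '4' '۴' _ _ rfl rfl,
      hb _ '3' '۳' _ _ rfl rfl, hb _ '2' '۲' _ _ rfl rfl, hb _ '1' '۱' _ _ rfl rfl,
      hb _ '0' '۰' _ _ rfl rfl, String.toList_ofList]
  simp only [List.map_map]
  apply List.map_congr_left
  intro x _
  simp only [Function.comp_apply]
  exact pv_char x
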